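-- pv_equiv track=rewrite | github.com/shield-h2020/dare | pre_processing.py | process_flag
-- ===== SOURCE A (Python) =====
-- list_flags = ['A', 'S', 'F', 'R', 'P', 'U', 'X']
--
-- def process_flag(flag):
--     flag_array = [0, 0, 0, 0, 0, 0]
--     contains_x = False
--
--     for i in range(len(list_flags)):
--         for letter in flag:
--             if letter == list_flags[i]:
--                 flag_array[i] += 1
--
--             if letter == 'X':
--                 contains_x = True
--
--     if contains_x:
--         return [1, 1, 1, 1, 1, 1]
--     else:
--         return flag_array
-- ===== SOURCE B (Python) =====
-- list_flags = ['A', 'S', 'F', 'R', 'P', 'U', 'X']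
--
-- def process_flag(flag):
--     # single pass: index map over the six countable flags; 'X' short-circuits to all-ones
--     idx = {f: i for i, f in enumerate(list_flags[:6])}
--     counts = [0, 0, 0, 0, 0, 0]
--     for letter in flag:
--         if letter == 'X':
--             return [1, 1, 1, 1, 1, 1]
--         i = idx.get(letter)
--         if i is not None:
--             counts[i] += 1
--     return counts
-- ===== Notes on version B (the rewrite author's own statement) =====
-- stated objective: simpler
-- what changed: Replaces A's 7 full scans of the string (one per flag letter, with a 7th 'X' pass that overruns the 6-slot array) by a single pass using a letter-to-index map, returning all-ones immediately on 'X'; Pre_ excludes strings containing 'X', where A raises IndexError.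
-- outside the precondition, e.g. on process_flag('X'): A raises IndexError, B returns [1, 1, 1, 1, 1, 1]
import Mathlib
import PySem

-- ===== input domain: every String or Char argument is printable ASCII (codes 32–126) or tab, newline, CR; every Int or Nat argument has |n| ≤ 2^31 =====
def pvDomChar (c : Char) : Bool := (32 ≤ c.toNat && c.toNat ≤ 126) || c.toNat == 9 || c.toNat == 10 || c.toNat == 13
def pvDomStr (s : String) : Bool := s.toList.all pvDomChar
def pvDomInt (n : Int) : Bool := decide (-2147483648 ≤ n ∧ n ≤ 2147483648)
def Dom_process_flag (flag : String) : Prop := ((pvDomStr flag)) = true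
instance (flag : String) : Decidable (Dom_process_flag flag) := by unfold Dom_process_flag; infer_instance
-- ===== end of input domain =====

-- B makes one pass with a letter→index map instead of A's seven scans; return values proved equal whenever A returns.

-- ===== PORT A =====
def pfFlags : List Char := ['A', 'S', 'F', 'R', 'P', 'U', 'X']

-- inner loop body of A: `if letter == list_flags[i]: flag_array[i] += 1 ; if letter == 'X': contains_x = True`
-- (the increment is ported as List.set, which is the identity at index 6; Python raises IndexError there,
--  and exactly those inputs are excluded by Pre_process_flag)
def pfInner (i : Nat) (st : List Int × Bool) (letter : Char) : List Int × Bool :=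
  let st1 := if letter = pfFlags.getD i ' ' then (st.1.set i (st.1.getD i 0 + 1), st.2) else st
  if letter = 'X' then (st1.1, true) else st1

def process_flag (flag : String) : List Int :=
  let st := (List.range pfFlags.length).foldl
              (fun st i => flag.toList.foldl (pfInner i) st)
              (([0, 0, 0, 0, 0, 0] : List Int), false)
  if st.2 then [1, 1, 1, 1, 1, 1] else st.1

-- ===== PORT B =====
def pfIdx : List (Char × Nat) := [('A', 0), ('S', 1), ('F', 2), ('R', 3), ('P', 4), ('U', 5)]

def pfGo : List Char → List Int → List Int
  | [], counts => counts
  | letter :: rest, counts =>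
    if letter = 'X' then [1, 1, 1, 1, 1, 1]
    else match pfIdx.lookup letter with
      | some i => pfGo rest (counts.set i (counts.getD i 0 + 1))
      | none => pfGo rest counts

def process_flag_alt (flag : String) : List Int :=
  pfGo flag.toList [0, 0, 0, 0, 0, 0]

-- ===== PRECONDITION & SPEC =====
-- Pre_ excludes exactly the strings containing 'X': there A raises IndexError (flag_array[6] += 1 on a 6-slot array); B returns [1,1,1,1,1,1] on them.
def Pre_process_flag (flag : String) : Prop := 'X' ∉ flag.toList
instance (flag : String) : Decidable (Pre_process_flag flag) := by unfold Pre_process_flag; infer_instance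
def pvWitness_process_flag : String := "ASFAU"

def Spec_process_flag (flag : String) (out : List Int) : Prop := out = process_flag_alt flag
instance (flag : String) (out : List Int) : Decidable (Spec_process_flag flag out) := by unfold Spec_process_flag; infer_instance

-- ===== CLAIM (what is proved, stated in full; the proofs are below) =====
def Claim_equal_process_flag : Prop := ∀ (flag : String), Dom_process_flag flag → Pre_process_flag flag → Spec_process_flag flag (process_flag flag)

-- ===== LEMMAS AND PROOFS =====

-- A's inner pass over the string, for a fixed flag index i, bumps slot i by the count of that flag letter
lemma pfInner_fold (i : Nat) (chars : List Char) (hx : 'X' ∉ chars) :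
    ∀ (arr : List Int) (b : Bool),
      chars.foldl (pfInner i) (arr, b)
        = (arr.set i (arr.getD i 0 + chars.count (pfFlags.getD i ' ')), b) := by
  induction chars with
  | nil =>
    intro arr b
    by_cases h : i < arr.length
    · simp [List.getD, List.getElem?_eq_getElem h]
    · rw [List.foldl_nil, List.set_eq_of_length_le (by omega : arr.length ≤ i)]
  | cons c rest ih =>
    intro arr b
    have hcx : c ≠ 'X' := fun h => hx (h ▸ List.mem_cons_self)
    have hrest : 'X' ∉ rest := fun h => hx (List.mem_cons_of_mem _ h)
    rw [List.foldl_cons]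
    by_cases hc : c = pfFlags.getD i ' '
    · have hXne : pfFlags.getD i ' ' ≠ 'X' := hc ▸ hcx
      have hstep : pfInner i (arr, b) c = (arr.set i (arr.getD i 0 + 1), b) := by
        simp only [pfInner, if_pos hc, if_neg hcx]
      rw [hstep, ih hrest]
      have hcnt : (c :: rest).count (pfFlags.getD i ' ') = rest.count (pfFlags.getD i ' ') + 1 := by
        simp [List.count_cons, hc]
      by_cases h : i < arr.length
      · have hg : (arr.set i (arr.getD i 0 + 1)).getD i 0 = arr.getD i 0 + 1 := by
          simp [List.getD, List.getElem?_set_self h]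
        rw [hg, List.set_set, hcnt]
        congr 2
        push_cast
        ring
      · simp [List.set_eq_of_length_le (by omega : arr.length ≤ i)]
    · have hstep : pfInner i (arr, b) c = (arr, b) := by
        simp only [pfInner, if_neg hc, if_neg hcx]
      rw [hstep, ih hrest]
      have hcnt : (c :: rest).count (pfFlags.getD i ' ') = rest.count (pfFlags.getD i ' ') := by
        simp only [List.count_cons, List.getD]
        simp [hc]
        exact hc
      rw [hcnt]

-- B's single pass, on an X-free string, adds each flag's count to the corresponding slot
lemma pfGo_eq (chars : List Char) (hx : 'X' ∉ chars) :
    ∀ (a b c d e f : Int),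
      pfGo chars [a, b, c, d, e, f]
        = [a + chars.count 'A', b + chars.count 'S', c + chars.count 'F',
           d + chars.count 'R', e + chars.count 'P', f + chars.count 'U'] := by
  induction chars with
  | nil => intro a b c d e f; simp [pfGo]
  | cons ch rest ih =>
    intro a b c d e f
    have hcx : ch ≠ 'X' := fun h => hx (h ▸ List.mem_cons_self)
    have hrest : 'X' ∉ rest := fun h => hx (List.mem_cons_of_mem _ h)
    simp only [pfGo, if_neg hcx]
    rcases Decidable.em (ch = 'A') with h1 | h1
    · subst h1; simp [pfIdx, List.lookup, ih hrest, List.count_cons]; ring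
    rcases Decidable.em (ch = 'S') with h2 | h2
    · subst h2; simp [pfIdx, List.lookup, ih hrest, List.count_cons]; ring
    rcases Decidable.em (ch = 'F') with h3 | h3
    · subst h3; simp [pfIdx, List.lookup, ih hrest, List.count_cons]; ring
    rcases Decidable.em (ch = 'R') with h4 | h4
    · subst h4; simp [pfIdx, List.lookup, ih hrest, List.count_cons]; ring
    rcases Decidable.em (ch = 'P') with h5 | h5
    · subst h5; simp [pfIdx, List.lookup, ih hrest, List.count_cons]; ring
    rcases Decidable.em (ch = 'U') with h6 | h6
    · subst h6; simp [pfIdx, List.lookup, ih hrest, List.count_cons]; ring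
    · have : pfIdx.lookup ch = none := by
        simp [pfIdx, List.lookup, beq_eq_false_iff_ne.mpr h1, beq_eq_false_iff_ne.mpr h2, beq_eq_false_iff_ne.mpr h3, beq_eq_false_iff_ne.mpr h4, beq_eq_false_iff_ne.mpr h5, beq_eq_false_iff_ne.mpr h6]
      simp [this, ih hrest, List.count_cons, h1, h2, h3, h4, h5, h6]

-- ===== VERDICT (by name: the statement is the Claim_ definition above) =====
theorem process_flag_spec : Claim_equal_process_flag := by
  intro flag _ hpre
  unfold Spec_process_flag process_flag process_flag_alt
  have hx : 'X' ∉ flag.toList := hpre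
  have hcnt : flag.toList.count 'X' = 0 := List.count_eq_zero.mpr hx
  simp only [pfFlags, List.length_cons, List.length_nil]
  rw [show List.range 7 = [0, 1, 2, 3, 4, 5, 6] from rfl]
  simp only [List.foldl_cons, List.foldl_nil]
  rw [pfInner_fold 0 _ hx, pfInner_fold 1 _ hx, pfInner_fold 2 _ hx, pfInner_fold 3 _ hx,
      pfInner_fold 4 _ hx, pfInner_fold 5 _ hx, pfInner_fold 6 _ hx]
  simp [pfFlags, List.getD, hcnt, pfGo_eq flag.toList hx]
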